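-- pv_equiv track=rewrite | github.com/WHO-WASHHAND/WHO-AI | app/yolov8/utils.py | process_steps_with_threshold
-- ===== SOURCE A (Python) =====
-- from collections import Counter
--
-- def process_steps_with_threshold(data, time_threshold=50):
--     # Kết quả lưu các step đã hoàn thành
--     completed_steps = []
--
--     # Biến lưu trữ thông tin về step hiện tại
--     step_window = []
--     start_time = None
--
--     for i, (step, time) in enumerate(data):
--         if start_time is None:
--             start_time = time  # Khởi tạo thời gian bắt đầu cho window
--
--         # Thêm step vào cửa sổ theo dõi
--         step_window.append((step, time))
--
--         # Kiểm tra nếu đã đạt ngưỡng thời gian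
--         if time - start_time >= time_threshold or i == len(data) - 1:
--             # Tính tần suất xuất hiện của các step trong cửa sổ
--             step_counts = Counter([s for s, _ in step_window])
--             most_common_step, count = step_counts.most_common(1)[0]
--
--             # Ghi lại step có tần suất xuất hiện nhiều nhất trong cửa sổ
--             if most_common_step is not None:
--                 step_start_time = step_window[0][1]
--                 step_end_time = step_window[-1][1]
--                 completed_steps.append([most_common_step, step_start_time, step_end_time])
--
--             # Reset lại cửa sổ theo dõi cho các step tiếp theo
--             step_window = []
--             start_time = None
--
--     return completed_steps
-- ===== SOURCE B (Python) =====
-- def _window_row(window):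
--     counts = {}
--     for s, _ in window:
--         counts[s] = counts.get(s, 0) + 1
--     best = max(counts.items(), key=lambda kv: kv[1])[0]
--     return [best, window[0][1], window[-1][1]]
--
--
-- def process_steps_with_threshold(data, time_threshold=50):
--     results = []
--     rest = list(data)
--     while rest:
--         start = rest[0][1]
--         cut = next((j for j, (_, t) in enumerate(rest) if t - start >= time_threshold),
--                    len(rest) - 1)
--         window, rest = rest[:cut + 1], rest[cut + 1:]
--         results.append(_window_row(window))
--     return results
-- ===== Notes on version B (the rewrite author's own statement) =====
-- stated objective: alternative
-- what changed: A runs one indexed loop carrying a mutable window/start-time state and flushing inline; B recursively slices the input into windows (finding each boundary up front with findIdx/next-over-enumerate, else the last element), maps each window to its row via an explicit count dict and max(items, key=count), keeping most_common's first-maximal tie-break.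
import Mathlib
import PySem

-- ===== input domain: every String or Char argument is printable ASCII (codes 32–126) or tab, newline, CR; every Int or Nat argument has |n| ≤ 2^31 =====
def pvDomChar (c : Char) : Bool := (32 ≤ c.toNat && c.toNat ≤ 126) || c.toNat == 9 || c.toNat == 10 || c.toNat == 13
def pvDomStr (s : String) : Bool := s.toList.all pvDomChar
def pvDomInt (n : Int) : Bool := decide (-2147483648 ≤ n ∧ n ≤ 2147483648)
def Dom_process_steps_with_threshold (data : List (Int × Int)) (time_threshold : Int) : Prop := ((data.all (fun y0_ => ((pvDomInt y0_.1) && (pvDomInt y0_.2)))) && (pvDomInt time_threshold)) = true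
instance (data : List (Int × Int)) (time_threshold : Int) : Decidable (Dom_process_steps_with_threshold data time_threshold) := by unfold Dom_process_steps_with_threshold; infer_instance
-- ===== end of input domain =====

-- B re-implements the single indexed windowing loop as recursive splitting: compute each
-- window boundary up front (first element crossing the threshold, else the last), slice it
-- off, and map the window to its row; same return value, objective: alternative decomposition.

-- ===== PORT A =====
-- Counter.most_common(1)[0]: the first item with maximal count
-- (heapq.nlargest(1, items, key=itemgetter(1)) keeps the earliest item on ties).
def pvMostCommon1 (items : List (Int × Int)) : Int × Int :=
  match items with
  | [] => (0, 0)   -- unreachable in A: the window is nonempty when most_common is called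
  | it :: rest => rest.foldl (fun best p => if best.2 < p.2 then p else best) it

def process_steps_with_threshold (data : List (Int × Int)) (time_threshold : Int) : List (List Int) :=
  ((PySem.List.enumerate data 0).foldl
    (fun (st : List (List Int) × List (Int × Int) × Option Int) p =>
      let i := p.1
      let step := p.2.1
      let time := p.2.2
      -- 'if start_time is None: start_time = time'
      let start_time : Int := match st.2.2 with | none => time | some s => s
      let step_window := st.2.1 ++ [(step, time)]
      if time - start_time ≥ time_threshold ∨ i = PySem.List.len data - 1 then
        let step_counts := PySem.Dict.counter (step_window.map (fun q => q.1))
        let mc := pvMostCommon1 step_counts.items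
        -- 'if most_common_step is not None': steps are Int here, so the test always holds
        let row := [mc.1, (PySem.List.pyGetD step_window 0 (0, 0)).2,
                          (PySem.List.pyGetD step_window (-1) (0, 0)).2]
        (st.1 ++ [row], [], none)
      else
        (st.1, step_window, some start_time))
    ([], [], none)).1

-- ===== PORT B =====
-- _window_row(window)
def pvWindowRow (window : List (Int × Int)) : List Int :=
  let counts := window.foldl (fun d q => d.insert q.1 (d.getD q.1 0 + 1))
    (PySem.Dict.empty : PySem.Dict Int Int)
  let best := ((PySem.List.max? counts.items (fun kv => kv.2)).getD (0, 0)).1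
  [best, (PySem.List.pyGetD window 0 (0, 0)).2, (PySem.List.pyGetD window (-1) (0, 0)).2]

-- the 'while rest:' loop: slice off one window per step
def pvAltGo (time_threshold : Int) : List (Int × Int) → List (List Int)
  | [] => []
  | q :: rest =>
    let all := q :: rest
    let cut := ((q :: rest).findIdx? (fun p => decide (p.2 - q.2 ≥ time_threshold))).getD
      (all.length - 1)
    pvWindowRow (all.take (cut + 1)) :: pvAltGo time_threshold (all.drop (cut + 1))
termination_by l => l.length
decreasing_by simp

def process_steps_with_threshold_alt (data : List (Int × Int)) (time_threshold : Int) : List (List Int) :=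
  pvAltGo time_threshold data

-- ===== PRECONDITION & SPEC =====
def Spec_process_steps_with_threshold (data : List (Int × Int)) (time_threshold : Int) (out : List (List Int)) : Prop := out = process_steps_with_threshold_alt data time_threshold
instance (data : List (Int × Int)) (time_threshold : Int) (out : List (List Int)) : Decidable (Spec_process_steps_with_threshold data time_threshold out) := by unfold Spec_process_steps_with_threshold; infer_instance

-- ===== CLAIM (what is proved, stated in full; the proofs are below) =====
def Claim_equal_process_steps_with_threshold : Prop := ∀ (data : List (Int × Int)) (time_threshold : Int), Dom_process_steps_with_threshold data time_threshold → Spec_process_steps_with_threshold data time_threshold (process_steps_with_threshold data time_threshold)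

-- ===== LEMMAS AND PROOFS =====

-- A's loop, written as a recursion on the remaining list: 'i == len(data)-1' becomes 'rest = []'.
def pvARow (w : List (Int × Int)) : List Int :=
  [(pvMostCommon1 (PySem.Dict.counter (w.map (fun q => q.1))).items).1,
   (PySem.List.pyGetD w 0 (0, 0)).2, (PySem.List.pyGetD w (-1) (0, 0)).2]

def pvAGo (thr : Int) : List (Int × Int) → List (Int × Int) → Option Int → List (List Int)
  | [], _, _ => []
  | (s, t) :: rest, w, st =>
    let start : Int := match st with | none => t | some x => x
    let w' := w ++ [(s, t)]
    if t - start ≥ thr ∨ rest = [] then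
      pvARow w' :: pvAGo thr rest [] none
    else
      pvAGo thr rest w' (some start)

-- L1: A's indexed fold computes pvAGo.
lemma pvL1 (thr n : Int) (ds : List (Int × Int)) : ∀ (k : Int)
    (acc : List (List Int)) (w : List (Int × Int)) (st : Option Int),
    k + (ds.length : Int) = n →
    ((PySem.List.enumerate ds k).foldl
      (fun (st' : List (List Int) × List (Int × Int) × Option Int) p =>
        let i := p.1
        let step := p.2.1
        let time := p.2.2
        let start_time : Int := match st'.2.2 with | none => time | some s => s
        let step_window := st'.2.1 ++ [(step, time)]
        if time - start_time ≥ thr ∨ i = n - 1 then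
          let step_counts := PySem.Dict.counter (step_window.map (fun q => q.1))
          let mc := pvMostCommon1 step_counts.items
          let row := [mc.1, (PySem.List.pyGetD step_window 0 (0, 0)).2,
                            (PySem.List.pyGetD step_window (-1) (0, 0)).2]
          (st'.1 ++ [row], [], none)
        else
          (st'.1, step_window, some start_time))
      (acc, w, st)).1 = acc ++ pvAGo thr ds w st := by
  induction ds with
  | nil => intro k acc w st h; simp [pvAGo, PySem.List.enumerate_nil]
  | cons hd rest ih =>
    intro k acc w st h
    obtain ⟨s, t⟩ := hd
    rw [PySem.List.enumerate_cons, List.foldl_cons]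
    have hiff : (k = n - 1) ↔ rest = [] := by
      rw [← List.length_eq_zero_iff]
      simp at h
      omega
    simp only []
    rw [if_congr (or_congr Iff.rfl hiff) rfl rfl]
    by_cases hc : t - (match st with | none => t | some x => x) ≥ thr ∨ rest = []
    · rw [if_pos hc]
      rw [ih (k + 1) _ _ _ (by simp at h ⊢; omega)]
      simp [pvAGo, hc, pvARow]
    · rw [if_neg hc]
      rw [ih (k + 1) _ _ _ (by simp at h ⊢; omega)]
      simp only [pvAGo]
      rw [if_neg hc]

-- the two row computations agree: same counts dict, and max(items, key=snd) is the
-- first item with maximal count.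
lemma pvFoldMax (l : List (Int × Int)) : ∀ (a : Int × Int),
    PySem.List.max? (a :: l) (fun kv => kv.2)
      = some (l.foldl (fun best p => if best.2 < p.2 then p else best) a) := by
  induction l with
  | nil => intro a; rfl
  | cons x xs ih =>
    intro a
    have h1 : PySem.List.max? (a :: x :: xs) (fun kv : Int × Int => kv.2)
        = PySem.List.max? ((if a.2 < x.2 then x else a) :: xs) (fun kv => kv.2) := by
      by_cases h : a.2 < x.2 <;> simp [PySem.List.max?, h]
    rw [h1, ih]
    simp only [List.foldl_cons]

lemma pvRow_eq (w : List (Int × Int)) : pvARow w = pvWindowRow w := by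
  have hd : w.foldl (fun d q => d.insert q.1 (d.getD q.1 0 + 1))
      (PySem.Dict.empty : PySem.Dict Int Int)
      = PySem.Dict.counter (w.map (fun q => q.1)) := by
    rw [← PySem.Dict.foldl_insert_getD_add_one_eq_counter, List.foldl_map]
  unfold pvARow pvWindowRow
  rw [hd]
  cases hit : (PySem.Dict.counter (w.map (fun q => q.1))).items with
  | nil => simp [pvMostCommon1, PySem.List.max?, hit]
  | cons it rest =>
    simp only [pvMostCommon1, hit]
    rw [pvFoldMax rest it]
    simp

-- boundary of findIdx? on w ++ x :: rest when no element of w crosses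
lemma pvFindIdx_append (w : List (Int × Int)) (p : (Int × Int) → Bool) (x : Int × Int)
    (rest : List (Int × Int)) (hw : ∀ q ∈ w, p q = false) (hx : p x = true) :
    (w ++ x :: rest).findIdx? p = some w.length := by
  induction w with
  | nil => simp [List.findIdx?_cons, hx]
  | cons a as ih =>
    have ha := hw a (by simp)
    simp only [List.cons_append, List.findIdx?_cons, ha]
    rw [ih (fun q hq => hw q (by simp [hq]))]
    simp

lemma pvFindIdx_none (l : List (Int × Int)) (p : (Int × Int) → Bool)
    (hl : ∀ q ∈ l, p q = false) : l.findIdx? p = none := by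
  induction l with
  | nil => rfl
  | cons a as ih =>
    simp only [List.findIdx?_cons, hl a (by simp)]
    rw [ih (fun q hq => hl q (by simp [hq]))]
    simp

-- one step of the window loop, shared by both branches of the invariant
lemma pvL2step (thr x s t : Int) (w rest : List (Int × Int))
    (hhead : ((w ++ (s, t) :: rest).headD (0, 0)).2 = x)
    (hall : ∀ q ∈ w, q.2 - x < thr)
    (ihP : ∀ (w' : List (Int × Int)) (st' : Option Int),
      ((w' = [] ∧ st' = none) ∨
        (∃ y, st' = some y ∧ (w'.headD (0, 0)).2 = y ∧ w' ≠ [] ∧ ∀ q ∈ w', q.2 - y < thr)) →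
      (rest = [] → w' = []) →
      pvAGo thr rest w' st' = pvAltGo thr (w' ++ rest)) :
    (if t - x ≥ thr ∨ rest = [] then pvARow (w ++ [(s, t)]) :: pvAGo thr rest [] none
     else pvAGo thr rest (w ++ [(s, t)]) (some x))
    = pvAltGo thr (w ++ (s, t) :: rest) := by
  obtain ⟨q0, tl, hwe⟩ : ∃ q0 tl, w ++ (s, t) :: rest = q0 :: tl := by
    cases w with
    | nil => exact ⟨(s, t), rest, rfl⟩
    | cons a as => exact ⟨a, as ++ (s, t) :: rest, rfl⟩
  have hq02 : q0.2 = x := by rw [hwe] at hhead; simpa using hhead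
  by_cases h1 : t - x ≥ thr
  · -- the new element closes the window at index w.length
    rw [if_pos (Or.inl h1), hwe, pvAltGo.eq_2, ← hwe, hq02]
    have hfi : (w ++ (s, t) :: rest).findIdx?
        (fun p => decide (p.2 - x ≥ thr)) = some w.length := by
      apply pvFindIdx_append
      · intro q hq; simpa using by have := hall q hq; omega
      · simpa using h1
    rw [hfi]
    have htake : (w ++ (s, t) :: rest).take (w.length + 1) = w ++ [(s, t)] := by
      rw [List.take_append]; simp
    have hdrop : (w ++ (s, t) :: rest).drop (w.length + 1) = rest := by
      rw [List.drop_append]; simp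
    simp only [Option.getD_some, htake, hdrop]
    rw [pvRow_eq, ihP [] none (Or.inl ⟨rfl, rfl⟩) (fun _ => rfl)]
    simp
  · by_cases h2 : rest = []
    · -- last element, below threshold: the whole list is one window
      subst h2
      rw [if_pos (Or.inr rfl), hwe, pvAltGo.eq_2, ← hwe, hq02]
      have hfi : (w ++ [(s, t)]).findIdx?
          (fun p => decide (p.2 - x ≥ thr)) = none := by
        apply pvFindIdx_none
        intro q hq
        simp only [List.mem_append, List.mem_singleton] at hq
        rcases hq with hq | hq
        · simpa using by have := hall q hq; omega
        · subst hq; simpa using by omega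
      rw [hfi]
      have hlen : (w ++ [(s, t)]).length - 1 + 1 = (w ++ [(s, t)]).length := by simp
      simp only [Option.getD_none, hlen, List.take_length, List.drop_length]
      rw [pvRow_eq]
      simp [pvAGo, pvAltGo]
    · -- window stays open
      rw [if_neg (not_or.mpr ⟨by omega, h2⟩)]
      rw [ihP (w ++ [(s, t)]) (some x) ?_ (fun h => absurd h h2)]
      · simp
      · refine Or.inr ⟨x, rfl, ?_, by simp, ?_⟩
        · cases w with
          | nil => simpa using hhead
          | cons a as => simpa using hhead
        · intro q hq
          simp only [List.mem_append, List.mem_singleton] at hq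
          rcases hq with hq | hq
          · exact hall q hq
          · subst hq; omega

-- L2: pvAGo equals B's window-splitting recursion, under the loop invariant.
lemma pvL2 (thr : Int) : ∀ (ds w : List (Int × Int)) (st : Option Int),
    ((w = [] ∧ st = none) ∨
      (∃ x, st = some x ∧ (w.headD (0, 0)).2 = x ∧ w ≠ [] ∧ ∀ q ∈ w, q.2 - x < thr)) →
    (ds = [] → w = []) →
    pvAGo thr ds w st = pvAltGo thr (w ++ ds) := by
  intro ds
  induction ds with
  | nil =>
    intro w st _ hnil
    rw [hnil rfl]
    simp [pvAGo, pvAltGo]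
  | cons hd rest ih =>
    intro w st hinv _
    obtain ⟨s, t⟩ := hd
    rcases hinv with ⟨hw, hst⟩ | ⟨x, hst, hx, hwne, hall⟩
    · subst hw hst
      simp only [pvAGo]
      exact pvL2step thr t s t [] rest (by simp) (by simp) (fun w' st' h1 h2 => ih w' st' h1 h2)
    · subst hst
      simp only [pvAGo]
      refine pvL2step thr x s t w rest ?_ hall (fun w' st' h1 h2 => ih w' st' h1 h2)
      cases w with
      | nil => exact absurd rfl hwne
      | cons a as => simpa using hx

-- ===== VERDICT (by name: the statement is the Claim_ definition above) =====
theorem process_steps_with_threshold_spec : Claim_equal_process_steps_with_threshold := by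
  intro data thr _
  unfold Spec_process_steps_with_threshold process_steps_with_threshold
    process_steps_with_threshold_alt
  rw [pvL1 thr (PySem.List.len data) data 0 [] [] none (by simp [PySem.List.len_eq])]
  rw [pvL2 thr data [] none (Or.inl ⟨rfl, rfl⟩) (fun h => rfl)]
  simp
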